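-- pv_equiv track=rewrite | github.com/shmitkokirill/system_engineering_2 | kdz1/main.py | vec_maximin
-- ===== SOURCE A (Python) =====
-- def vec_maximin(U_Matrix):
--     res = []
--     for row in U_Matrix:
--         max_1 = 0
--         max_2 = 0
--         for vec in row:
--             if vec[0] > max_1:
--                 max_1 = vec[0]
--             if vec[1] > max_2:
--                 max_2 = vec[1]
--         res.append([max_1, max_2])
--     return res
-- ===== SOURCE B (Python) =====
-- def vec_maximin(U_Matrix):
--     res = []
--     for row in U_Matrix:
--         c1, c2 = zip((0, 0), *row)
--         res.append([sorted(c1)[-1], sorted(c2)[-1]])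
--     return res
-- ===== Notes on version B (the rewrite author's own statement) =====
-- stated objective: alternative
-- what changed: B zips a (0,0) floor pair together with the row's vectors, unpacking the two component columns, and takes each answer entry as the LAST element of the SORTED column (sort-then-take-last), instead of A's element-wise pass maintaining two running maxima with comparisons; the prepended 0 supplies the floor and the empty-row case without any branch.
import Mathlib
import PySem

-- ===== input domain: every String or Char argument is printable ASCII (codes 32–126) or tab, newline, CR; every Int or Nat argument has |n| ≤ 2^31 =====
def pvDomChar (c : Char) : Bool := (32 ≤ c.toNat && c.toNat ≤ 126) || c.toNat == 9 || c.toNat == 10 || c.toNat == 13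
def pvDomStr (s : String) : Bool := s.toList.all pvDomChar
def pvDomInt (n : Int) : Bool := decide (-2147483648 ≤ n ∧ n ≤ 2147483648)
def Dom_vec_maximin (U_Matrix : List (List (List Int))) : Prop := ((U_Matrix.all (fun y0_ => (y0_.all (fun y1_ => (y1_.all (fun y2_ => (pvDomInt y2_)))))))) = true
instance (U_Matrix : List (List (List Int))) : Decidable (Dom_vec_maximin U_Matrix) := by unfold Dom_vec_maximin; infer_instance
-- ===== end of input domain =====

-- B zips a (0,0) floor pair with the row's vectors into two component columns and takes each
-- result entry as the last element of the sorted column, instead of A's element-wise pass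
-- maintaining two running maxima (objective: alternative algorithm, no speed claim).

-- ===== PORT A =====
-- vec[0]/vec[1]: exact via pyGet?; Pre_ below guarantees the index is in range, so .getD 0 is never taken.
def vec_maximin (U_Matrix : List (List (List Int))) : List (List Int) :=
  U_Matrix.foldl (fun res row =>
    let p := row.foldl (fun (m : Int × Int) vec =>
      let m1 := if (PySem.List.pyGet? vec 0).getD 0 > m.1 then (PySem.List.pyGet? vec 0).getD 0 else m.1
      let m2 := if (PySem.List.pyGet? vec 1).getD 0 > m.2 then (PySem.List.pyGet? vec 1).getD 0 else m.2
      (m1, m2)) (0, 0)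
    res ++ [[p.1, p.2]]) []

-- ===== PORT B =====
-- c1, c2 = zip((0, 0), *row) ported by hand (PySem has no variadic zip): when every vector
-- has >= 2 entries (Pre_ below) the unpack succeeds and column k is 0 followed by the k-th
-- components in row order; when some vector is shorter the unpack raises ValueError, which
-- lies outside Pre_. sorted(c)[-1] is PySem.List.sorted then pyGet? at -1 (the column is
-- nonempty, so .getD 0 is never taken).
def vec_maximin_alt (U_Matrix : List (List (List Int))) : List (List Int) :=
  U_Matrix.foldl (fun res row =>
    let c1 := (0 : Int) :: row.map (fun v => (PySem.List.pyGet? v 0).getD 0)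
    let c2 := (0 : Int) :: row.map (fun v => (PySem.List.pyGet? v 1).getD 0)
    res ++ [[(PySem.List.pyGet? (PySem.List.sorted c1 (fun x => x) false) (-1)).getD 0,
             (PySem.List.pyGet? (PySem.List.sorted c2 (fun x => x) false) (-1)).getD 0]]) []

-- ===== PRECONDITION & SPEC =====
-- A raises IndexError (vec[1]) when some inner vector has fewer than 2 components; those inputs are excluded.
def Pre_vec_maximin (U_Matrix : List (List (List Int))) : Prop :=
  ∀ row ∈ U_Matrix, ∀ v ∈ row, 2 ≤ v.length
instance (U_Matrix : List (List (List Int))) : Decidable (Pre_vec_maximin U_Matrix) := by unfold Pre_vec_maximin; infer_instance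

def pvWitness_vec_maximin : List (List (List Int)) := [[[1, 2], [3, -4]], []]

def Spec_vec_maximin (U_Matrix : List (List (List Int))) (out : List (List Int)) : Prop := out = vec_maximin_alt U_Matrix
instance (U_Matrix : List (List (List Int))) (out : List (List Int)) : Decidable (Spec_vec_maximin U_Matrix out) := by unfold Spec_vec_maximin; infer_instance

-- ===== CLAIM (what is proved, stated in full; the proofs are below) =====
def Claim_equal_vec_maximin : Prop := ∀ (U_Matrix : List (List (List Int))), Dom_vec_maximin U_Matrix → Pre_vec_maximin U_Matrix → Spec_vec_maximin U_Matrix (vec_maximin U_Matrix)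

-- ===== LEMMAS AND PROOFS =====

-- A's pair-fold components are the column max-folds, for any accumulator.
theorem row_fold_eq (row : List (List Int)) (m1 m2 : Int) :
    row.foldl (fun (m : Int × Int) vec =>
      ((if (PySem.List.pyGet? vec 0).getD 0 > m.1 then (PySem.List.pyGet? vec 0).getD 0 else m.1),
       (if (PySem.List.pyGet? vec 1).getD 0 > m.2 then (PySem.List.pyGet? vec 1).getD 0 else m.2))) (m1, m2)
    = ((row.map (fun v => (PySem.List.pyGet? v 0).getD 0)).foldl max m1,
       (row.map (fun v => (PySem.List.pyGet? v 1).getD 0)).foldl max m2) := by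
  induction row generalizing m1 m2 with
  | nil => rfl
  | cons v t ih =>
      simp only [List.foldl_cons, List.map_cons]
      rw [ih]
      congr 1 <;> · congr 1; split <;> omega

theorem foldl_max_mem (xs : List Int) (a : Int) : xs.foldl max a ∈ a :: xs := by
  induction xs generalizing a with
  | nil => simp
  | cons x t ih =>
      simp only [List.foldl_cons]
      rcases List.mem_cons.mp (ih (max a x)) with h | h
      · rw [h]
        rcases max_choice a x with hm | hm <;> rw [hm] <;> simp
      · simp [h]

theorem le_foldl_max (xs : List Int) (a : Int) : ∀ x ∈ a :: xs, x ≤ xs.foldl max a := by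
  induction xs generalizing a with
  | nil => simp
  | cons y t ih =>
      intro x hx
      simp only [List.foldl_cons]
      simp only [List.mem_cons] at hx
      rcases hx with h | h | h
      · subst h; exact le_trans (le_max_left x y) (ih (max x y) (max x y) (List.mem_cons_self ..))
      · subst h; exact le_trans (le_max_right a x) (ih (max a x) (max a x) (List.mem_cons_self ..))
      · exact ih (max a y) x (List.mem_cons_of_mem _ h)

theorem pairwise_le_getLast (s : List Int) (hs : s ≠ []) (hp : s.Pairwise (· ≤ ·)) :
    ∀ x ∈ s, x ≤ s.getLast hs := by
  induction s with
  | nil => simp at hs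
  | cons a t ih =>
      rcases List.pairwise_cons.mp hp with ⟨ha, hpt⟩
      intro x hx
      simp only [List.mem_cons] at hx
      rcases List.eq_nil_or_concat t with ht | ⟨_, _, ht⟩
      · subst ht
        rcases hx with h | h
        · simp [h]
        · simp at h
      · have htne : t ≠ [] := by simp [ht]
        rw [List.getLast_cons htne]
        rcases hx with h | h
        · exact h ▸ ha _ (List.getLast_mem htne)
        · exact ih htne hpt x h

-- sorted(0 :: xs)[-1] is the running max of xs floored at 0.
theorem sorted_last_eq_foldl_max (xs : List Int) :
    (PySem.List.pyGet?
      (PySem.List.sorted ((0 : Int) :: xs) (fun x => x) false) (-1)).getD 0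
    = xs.foldl max 0 := by
  set s := PySem.List.sorted ((0 : Int) :: xs) (fun x => x) false with hsdef
  have hlen : s.length = ((0 : Int) :: xs).length := by
    rw [hsdef]; exact PySem.List.length_sorted ((0 : Int) :: xs) (fun x => x) false
  have hsne : s ≠ [] := by
    intro h; rw [h] at hlen; simp at hlen
  have h1 : 1 ≤ s.length := by
    rw [hlen]; simp
  have hmem : ∀ x : Int, x ∈ s ↔ x ∈ (0 : Int) :: xs := by
    intro x; rw [hsdef]; exact PySem.List.mem_sorted ((0 : Int) :: xs) (fun x => x) false x
  have hget : PySem.List.pyGet? s (-1) = some (s.getLast hsne) := by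
    simp only [PySem.List.pyGet?, PySem.List.pyIdx?]
    norm_num [h1]
    rw [← List.getLast?_eq_getElem?, List.getLast?_eq_some_getLast hsne]
  rw [hget]
  simp only [Option.getD_some]
  have hpw : s.Pairwise (· ≤ ·) := by
    rw [hsdef]
    have := PySem.List.sorted_pairwise ((0 : Int) :: xs) (fun x => x)
    simpa using this
  apply le_antisymm
  · exact le_foldl_max xs 0 _ ((hmem _).mp (List.getLast_mem hsne))
  · exact pairwise_le_getLast s hsne hpw _ ((hmem _).mpr (foldl_max_mem xs 0))

theorem vec_maximin_foldl_eq_map (U : List (List (List Int))) (acc : List (List Int)) :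
    U.foldl (fun res row =>
      let p := row.foldl (fun (m : Int × Int) vec =>
        ((if (PySem.List.pyGet? vec 0).getD 0 > m.1 then (PySem.List.pyGet? vec 0).getD 0 else m.1),
         (if (PySem.List.pyGet? vec 1).getD 0 > m.2 then (PySem.List.pyGet? vec 1).getD 0 else m.2))) (0, 0)
      res ++ [[p.1, p.2]]) acc
    = acc ++ U.map (fun row =>
        [(row.map (fun v => (PySem.List.pyGet? v 0).getD 0)).foldl max 0,
         (row.map (fun v => (PySem.List.pyGet? v 1).getD 0)).foldl max 0]) := by
  induction U generalizing acc with
  | nil => simp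
  | cons row t ih =>
      simp only [List.foldl_cons, List.map_cons]
      rw [ih, row_fold_eq]
      simp

theorem foldl_append_singleton {α β : Type} (f : α → β) (U : List α) (acc : List β) :
    U.foldl (fun res row => res ++ [f row]) acc = acc ++ U.map f := by
  induction U generalizing acc with
  | nil => simp
  | cons row t ih => simp [ih]

-- ===== VERDICT (by name: the statement is the Claim_ definition above) =====
theorem vec_maximin_spec : Claim_equal_vec_maximin := by
  intro U _ _
  show vec_maximin U = vec_maximin_alt U
  unfold vec_maximin vec_maximin_alt
  rw [vec_maximin_foldl_eq_map U [],
      foldl_append_singleton (fun row : List (List Int) =>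
        [(PySem.List.pyGet? (PySem.List.sorted ((0 : Int) :: row.map (fun v => (PySem.List.pyGet? v 0).getD 0)) (fun x => x) false) (-1)).getD 0,
         (PySem.List.pyGet? (PySem.List.sorted ((0 : Int) :: row.map (fun v => (PySem.List.pyGet? v 1).getD 0)) (fun x => x) false) (-1)).getD 0]) U []]
  simp [sorted_last_eq_foldl_max]
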